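-- pv_equiv track=rewrite | github.com/madkne/Persian-CALendar | common.py | PCAL_NormalizeWeekday
-- ===== SOURCE A (Python) =====
-- def PCAL_NormalizeWeekday(weekday):
--     # =>weekday (gor=>jal) where Monday == 0 ... Sunday == 6.
--     fixed = weekday
--     for i in range(0, 2, 1):
--         if fixed+1 == 7:
--             fixed = 0
--         else:
--             fixed += 1
--     return fixed
-- ===== SOURCE B (Python) =====
-- def PCAL_NormalizeWeekday(weekday):
--     # Closed form: wrap the two single-step wraps (5->0, 6->1); otherwise shift by 2.
--     if weekday == 5:
--         return 0
--     if weekday == 6: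
--         return 1
--     return weekday + 2
-- ===== Notes on version B (the rewrite author's own statement) =====
-- stated objective: simpler
-- what changed: Replaced the two-iteration increment-with-wrap loop by a direct closed-form mapping: a constant result for each of the two wrap cases and the shifted value otherwise.
import Mathlib
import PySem

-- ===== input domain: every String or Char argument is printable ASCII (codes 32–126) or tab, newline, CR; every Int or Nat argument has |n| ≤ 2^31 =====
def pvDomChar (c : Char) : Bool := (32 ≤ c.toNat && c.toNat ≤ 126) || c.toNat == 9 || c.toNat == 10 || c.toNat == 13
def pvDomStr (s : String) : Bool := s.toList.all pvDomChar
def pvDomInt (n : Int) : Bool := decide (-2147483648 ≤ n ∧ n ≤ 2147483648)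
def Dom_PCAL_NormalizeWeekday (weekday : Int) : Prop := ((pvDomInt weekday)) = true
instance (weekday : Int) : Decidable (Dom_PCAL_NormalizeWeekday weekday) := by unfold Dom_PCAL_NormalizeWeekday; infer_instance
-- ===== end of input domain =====

-- B replaces A's two-iteration wrap loop with a closed-form mapping (simpler).

-- ===== PORT A =====
-- literal port: fold of the loop body over range(0, 2, 1)
def PCAL_NormalizeWeekday (weekday : Int) : Int :=
  (PySem.List.pyRange 0 2 1).foldl
    (fun fixed _ => if fixed + 1 == 7 then 0 else fixed + 1) weekday

-- ===== PORT B =====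
def PCAL_NormalizeWeekday_alt (weekday : Int) : Int :=
  if weekday == 5 then 0
  else if weekday == 6 then 1
  else weekday + 2

-- ===== PRECONDITION & SPEC =====
def Spec_PCAL_NormalizeWeekday (weekday : Int) (out : Int) : Prop := out = PCAL_NormalizeWeekday_alt weekday
instance (weekday : Int) (out : Int) : Decidable (Spec_PCAL_NormalizeWeekday weekday out) := by unfold Spec_PCAL_NormalizeWeekday; infer_instance

-- ===== CLAIM (what is proved, stated in full; the proofs are below) =====
def Claim_equal_PCAL_NormalizeWeekday : Prop := ∀ (weekday : Int), Dom_PCAL_NormalizeWeekday weekday → Spec_PCAL_NormalizeWeekday weekday (PCAL_NormalizeWeekday weekday)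

-- ===== LEMMAS AND PROOFS =====

-- ===== VERDICT (by name: the statement is the Claim_ definition above) =====
theorem PCAL_NormalizeWeekday_spec : Claim_equal_PCAL_NormalizeWeekday := by
  intro w _
  unfold Spec_PCAL_NormalizeWeekday PCAL_NormalizeWeekday PCAL_NormalizeWeekday_alt
  rw [show PySem.List.pyRange 0 2 1 = [0, 1] from by decide]
  simp only [List.foldl]
  split_ifs <;> simp_all [beq_iff_eq] <;> omega
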